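-- pv_equiv track=rewrite | github.com/TyuiX/UndergradCodingHomeWork | homework4.py | iterative_num_of_pushups
-- ===== SOURCE A (Python) =====
-- def iterative_num_of_pushups(cur_push_ups, days):
--     numberpushup = 0
--     for i in range(days):
--         if i == 0:
--             numberpushup += cur_push_ups
--         elif  4 >= i > 0:
--             numberpushup *= 2
--         elif 5 <= i <= 9:
--             numberpushup += 10
--         elif 10 <= i <= 19:
--             numberpushup += 8
--         else:
--             numberpushup += 5
--     return numberpushup
-- ===== SOURCE B (Python) =====
-- def iterative_num_of_pushups(cur_push_ups, days):
--     # Closed form: day 0 adds cur_push_ups, days 1-4 double, days 5-9 add 10,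
--     # days 10-19 add 8, later days add 5 each.
--     if days <= 0:
--         return 0
--     total = cur_push_ups * 2 ** min(days - 1, 4)
--     total += 10 * max(0, min(days, 10) - 5)
--     total += 8 * max(0, min(days, 20) - 10)
--     total += 5 * max(0, days - 20)
--     return total
-- ===== Notes on version B (the rewrite author's own statement) =====
-- stated objective: faster
-- what changed: Replaces the day-by-day simulation loop with a closed-form expression that counts the days in each bracket (doubling days as a power of two, constant-addition days by multiplication).
import Mathlib
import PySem

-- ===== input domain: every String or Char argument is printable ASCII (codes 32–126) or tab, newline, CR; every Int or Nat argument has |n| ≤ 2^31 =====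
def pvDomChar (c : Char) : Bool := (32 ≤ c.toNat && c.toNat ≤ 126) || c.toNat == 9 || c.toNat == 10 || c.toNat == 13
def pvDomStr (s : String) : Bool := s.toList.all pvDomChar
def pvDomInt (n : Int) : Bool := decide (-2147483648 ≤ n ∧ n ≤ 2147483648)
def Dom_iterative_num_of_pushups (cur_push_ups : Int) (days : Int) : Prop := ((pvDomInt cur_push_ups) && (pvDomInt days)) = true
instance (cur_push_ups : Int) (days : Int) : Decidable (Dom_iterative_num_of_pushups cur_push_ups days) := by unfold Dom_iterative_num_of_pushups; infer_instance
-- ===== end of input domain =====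

-- B replaces the day-by-day simulation loop with an O(1) closed form over the day brackets.

-- ===== PORT A =====
-- the loop body of A, one day i applied to the accumulator
def pvStepA (cur_push_ups acc i : Int) : Int :=
  if i = 0 then acc + cur_push_ups
  else if 4 ≥ i ∧ i > 0 then acc * 2
  else if 5 ≤ i ∧ i ≤ 9 then acc + 10
  else if 10 ≤ i ∧ i ≤ 19 then acc + 8
  else acc + 5

def iterative_num_of_pushups (cur_push_ups : Int) (days : Int) : Int :=
  (PySem.List.pyRange 0 days 1).foldl (pvStepA cur_push_ups) 0

-- ===== PORT B =====
def iterative_num_of_pushups_alt (cur_push_ups : Int) (days : Int) : Int :=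
  if days ≤ 0 then 0
  else cur_push_ups * 2 ^ (min (days - 1) 4).toNat
       + 10 * max 0 (min days 10 - 5)
       + 8 * max 0 (min days 20 - 10)
       + 5 * max 0 (days - 20)

-- ===== PRECONDITION & SPEC =====
def Spec_iterative_num_of_pushups (cur_push_ups : Int) (days : Int) (out : Int) : Prop := out = iterative_num_of_pushups_alt cur_push_ups days
instance (cur_push_ups : Int) (days : Int) (out : Int) : Decidable (Spec_iterative_num_of_pushups cur_push_ups days out) := by unfold Spec_iterative_num_of_pushups; infer_instance

-- ===== CLAIM (what is proved, stated in full; the proofs are below) =====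
def Claim_equal_iterative_num_of_pushups : Prop := ∀ (cur_push_ups : Int) (days : Int), Dom_iterative_num_of_pushups cur_push_ups days → Spec_iterative_num_of_pushups cur_push_ups days (iterative_num_of_pushups cur_push_ups days)

-- ===== LEMMAS AND PROOFS =====

lemma pv_step_alt (c : Int) (n : Nat) :
    pvStepA c (iterative_num_of_pushups_alt c (n : Int)) (n : Int)
      = iterative_num_of_pushups_alt c ((n : Int) + 1) := by
  by_cases h : n < 20
  · interval_cases n <;> norm_num [pvStepA, iterative_num_of_pushups_alt, show ((2:Int)).toNat = 2 from rfl, show ((3:Int)).toNat = 3 from rfl, show ((4:Int)).toNat = 4 from rfl] <;> ring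
  · push Not at h
    have hn : (20 : Int) ≤ (n : Int) := by exact_mod_cast h
    have h1 : ¬ ((n : Int) ≤ 0) := by omega
    have h2 : ¬ ((n : Int) + 1 ≤ 0) := by omega
    have e1 : min ((n : Int) - 1) 4 = 4 := by omega
    have e2 : min ((n : Int) + 1 - 1) 4 = 4 := by omega
    have e3 : min (n : Int) 10 = 10 := by omega
    have e4 : min ((n : Int) + 1) 10 = 10 := by omega
    have e5 : min (n : Int) 20 = 20 := by omega
    have e6 : min ((n : Int) + 1) 20 = 20 := by omega
    have e7 : max 0 ((n : Int) - 20) = (n : Int) - 20 := by omega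
    have e8 : max 0 ((n : Int) + 1 - 20) = (n : Int) - 19 := by omega
    simp only [iterative_num_of_pushups_alt, pvStepA, if_neg h1, if_neg h2,
      e1, e2, e3, e4, e5, e6, e7, e8]
    have hb1 : ¬ ((n : Int) = 0) := by omega
    have hb2 : ¬ (4 ≥ (n : Int) ∧ (n : Int) > 0) := by omega
    have hb3 : ¬ (5 ≤ (n : Int) ∧ (n : Int) ≤ 9) := by omega
    have hb4 : ¬ (10 ≤ (n : Int) ∧ (n : Int) ≤ 19) := by omega
    simp only [if_neg hb1, if_neg hb2, if_neg hb3, if_neg hb4]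
    norm_num
    ring

lemma pv_key (c : Int) (n : Nat) :
    (PySem.List.pyRange 0 (n : Int) 1).foldl (pvStepA c) 0
      = iterative_num_of_pushups_alt c (n : Int) := by
  induction n with
  | zero => simp [PySem.List.pyRange_one_eq_nil le_rfl, iterative_num_of_pushups_alt]
  | succ n ih =>
    have hcast : ((n + 1 : Nat) : Int) = (n : Int) + 1 := by push_cast; ring
    rw [hcast, PySem.List.pyRange_one_succ_right (by positivity : (0 : Int) ≤ (n : Int)),
      List.foldl_append]
    simp only [List.foldl_cons, List.foldl_nil]
    rw [ih, pv_step_alt]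

-- ===== VERDICT (by name: the statement is the Claim_ definition above) =====
theorem iterative_num_of_pushups_spec : Claim_equal_iterative_num_of_pushups := by
  intro c d _
  unfold Spec_iterative_num_of_pushups iterative_num_of_pushups
  by_cases hd : d ≤ 0
  · rw [PySem.List.pyRange_one_eq_nil hd]
    simp [iterative_num_of_pushups_alt, hd]
  · have : d = ((d.toNat : Nat) : Int) := by omega
    rw [this]
    exact pv_key c d.toNat
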